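-- pv_equiv track=rewrite | github.com/gertjanbron/zornq | code/b6e_zorn_triplet_dmrg.py | cylinder_bonds
-- ===== SOURCE A (Python) =====
-- def cylinder_bonds(Ly, Lx):
--     n = Ly*Lx; coords = []
--     for x in range(Lx):
--         rng = range(Ly) if x%2==0 else range(Ly-1,-1,-1)
--         for y in rng: coords.append((y,x))
--     c2s = {c:i for i,c in enumerate(coords)}
--     bonds = set()
--     for x in range(Lx):
--         for y in range(Ly):
--             if x < Lx-1:
--                 s1,s2 = c2s[(y,x)],c2s[(y,x+1)]
--                 bonds.add((min(s1,s2),max(s1,s2)))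
--             y2 = (y+1)%Ly
--             s1,s2 = c2s[(y,x)],c2s[(y2,x)]
--             if s1 != s2: bonds.add((min(s1,s2),max(s1,s2)))
--     return n, sorted(bonds)
-- ===== SOURCE B (Python) =====
-- def cylinder_bonds(Ly, Lx):
--     # Emit the bonds directly in sorted order -- no coords list, no dict, no set,
--     # no sort: for each site s (snake order), append the bonds having s as their
--     # smaller endpoint, in increasing order of the larger endpoint.
--     bonds = []
--     for x in range(Lx):
--         base = x * Ly
--         for j in range(Ly):
--             s = base + j
--             if j < Ly - 1:
--                 bonds.append((s, s + 1))            # vertical bond to the next site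
--             if j == 0 and Ly > 2:
--                 bonds.append((s, s + Ly - 1))       # cylinder wrap bond of this column
--             if x < Lx - 1:
--                 bonds.append((s, 2*base + 2*Ly - 1 - s))   # horizontal bond to column x+1
--     return Ly * Lx, bonds
-- ===== Notes on version B (the rewrite author's own statement) =====
-- stated objective: simpler
-- what changed: B removes A's coords list, coordinate-to-site dict, bond set and final sort entirely: it emits each site's incident bonds (rung, column wrap, horizontal) with that site as the smaller endpoint directly in sorted order, in one pass, appending to a plain list.
import Mathlib
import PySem

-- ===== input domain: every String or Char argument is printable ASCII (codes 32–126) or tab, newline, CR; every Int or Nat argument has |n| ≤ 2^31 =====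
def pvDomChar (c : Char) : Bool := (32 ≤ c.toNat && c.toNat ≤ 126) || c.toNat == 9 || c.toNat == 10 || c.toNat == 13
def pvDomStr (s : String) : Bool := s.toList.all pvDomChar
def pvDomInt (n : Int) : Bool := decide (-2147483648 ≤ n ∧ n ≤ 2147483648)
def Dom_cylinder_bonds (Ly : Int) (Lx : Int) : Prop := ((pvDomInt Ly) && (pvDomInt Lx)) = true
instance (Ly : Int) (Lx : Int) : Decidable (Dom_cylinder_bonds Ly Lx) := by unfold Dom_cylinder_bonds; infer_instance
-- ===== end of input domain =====

-- B drops A's coords list, dict, set and sort and emits each site's bonds directly in sorted order in one pass.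

-- ===== PORT A =====
-- rng = range(Ly) if x%2==0 else range(Ly-1,-1,-1)
def cbRng (Ly : Int) (x : Int) : List Int :=
  if PySem.Int.mod x 2 == 0 then PySem.List.pyRange 0 Ly 1
  else PySem.List.pyRange (Ly - 1) (-1) (-1)

-- the coords list built by the first double loop
def cbCoords (Ly : Int) (Lx : Int) : List (Int × Int) :=
  (PySem.List.pyRange 0 Lx 1).foldl
    (fun coords x => (cbRng Ly x).foldl (fun coords y => coords ++ [(y, x)]) coords) []

-- c2s = {c: i for i, c in enumerate(coords)}
def cbC2s (Ly : Int) (Lx : Int) : PySem.Dict (Int × Int) Int :=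
  (PySem.List.enumerate (cbCoords Ly Lx) 0).foldl
    (fun d p => d.insert p.2 p.1) PySem.Dict.empty

def cylinder_bonds (Ly : Int) (Lx : Int) : Int × (List (Int × Int)) :=
  let n := Ly * Lx
  let c2s := cbC2s Ly Lx
  -- c2s[(y,x)] ported as getD _ 0: every looked-up key is in the dict, so no KeyError arises
  let bonds : PySem.Set (Int × Int) :=
    (PySem.List.pyRange 0 Lx 1).foldl (fun bonds x =>
      (PySem.List.pyRange 0 Ly 1).foldl (fun bonds y =>
        let bonds :=
          if x < Lx - 1 then
            let s1 := c2s.getD (y, x) 0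
            let s2 := c2s.getD (y, x + 1) 0
            PySem.Set.add bonds (min s1 s2, max s1 s2)
          else bonds
        let y2 := PySem.Int.mod (y + 1) Ly
        let s1 := c2s.getD (y, x) 0
        let s2 := c2s.getD (y2, x) 0
        if s1 ≠ s2 then PySem.Set.add bonds (min s1 s2, max s1 s2) else bonds)
        bonds) PySem.Set.empty
  (n, PySem.List.sorted2 bonds (·.1) (·.2))

-- ===== PORT B =====
def cylinder_bonds_alt (Ly : Int) (Lx : Int) : Int × (List (Int × Int)) :=
  let bonds : List (Int × Int) :=
    (PySem.List.pyRange 0 Lx 1).foldl (fun bonds x =>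
      let base := x * Ly
      (PySem.List.pyRange 0 Ly 1).foldl (fun bonds j =>
        let s := base + j
        let bonds := if j < Ly - 1 then bonds ++ [(s, s + 1)] else bonds
        let bonds := if j = 0 ∧ Ly > 2 then bonds ++ [(s, s + Ly - 1)] else bonds
        if x < Lx - 1 then bonds ++ [(s, 2 * base + 2 * Ly - 1 - s)] else bonds)
        bonds) []
  (Ly * Lx, bonds)

-- ===== PRECONDITION & SPEC =====
def Spec_cylinder_bonds (Ly : Int) (Lx : Int) (out : Int × (List (Int × Int))) : Prop := out = cylinder_bonds_alt Ly Lx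
instance (Ly : Int) (Lx : Int) (out : Int × (List (Int × Int))) : Decidable (Spec_cylinder_bonds Ly Lx out) := by unfold Spec_cylinder_bonds; infer_instance

-- ===== CLAIM (what is proved, stated in full; the proofs are below) =====
def Claim_equal_cylinder_bonds : Prop := ∀ (Ly : Int) (Lx : Int), Dom_cylinder_bonds Ly Lx → Spec_cylinder_bonds Ly Lx (cylinder_bonds Ly Lx)

-- ===== LEMMAS AND PROOFS =====

-- the snake index coords[.]-inverse used only in the proofs
def cbIdx (Ly : Int) (y : Int) (x : Int) : Int :=
  x * Ly + (if PySem.Int.mod x 2 == 0 then y else Ly - 1 - y)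

-- the two bonds A's inner body inserts at (x, y), in insertion order
def aItems (Ly : Int) (Lx : Int) (x : Int) (y : Int) : List (Int × Int) :=
  (if x < Lx - 1 then
     [(min (cbIdx Ly y x) (cbIdx Ly y (x + 1)), max (cbIdx Ly y x) (cbIdx Ly y (x + 1)))]
   else [])
  ++ (if cbIdx Ly y x ≠ cbIdx Ly (PySem.Int.mod (y + 1) Ly) x then
        [(min (cbIdx Ly y x) (cbIdx Ly (PySem.Int.mod (y + 1) Ly) x),
          max (cbIdx Ly y x) (cbIdx Ly (PySem.Int.mod (y + 1) Ly) x))]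
      else [])

def allA (Ly : Int) (Lx : Int) : List (Int × Int) :=
  (PySem.List.pyRange 0 Lx 1).flatMap (fun x =>
    (PySem.List.pyRange 0 Ly 1).flatMap (fun y => aItems Ly Lx x y))

-- the bonds B's inner body appends at (x, j)
def bSite (Ly : Int) (Lx : Int) (x : Int) (j : Int) : List (Int × Int) :=
  (if j < Ly - 1 then [(x * Ly + j, x * Ly + j + 1)] else [])
  ++ (if j = 0 ∧ Ly > 2 then [(x * Ly + j, x * Ly + j + Ly - 1)] else [])
  ++ (if x < Lx - 1 then [(x * Ly + j, 2 * (x * Ly) + 2 * Ly - 1 - (x * Ly + j))] else [])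

def allB (Ly : Int) (Lx : Int) : List (Int × Int) :=
  (PySem.List.pyRange 0 Lx 1).flatMap (fun x =>
    (PySem.List.pyRange 0 Ly 1).flatMap (fun j => bSite Ly Lx x j))

-- canonical description of the bond set
def BondCond (Ly : Int) (Lx : Int) (p : Int × Int) : Prop :=
  ∃ x, 0 ≤ x ∧ x < Lx ∧
    ((∃ s, x * Ly ≤ s ∧ s ≤ x * Ly + Ly - 2 ∧ p = (s, s + 1))
     ∨ (2 ≤ Ly ∧ p = (x * Ly, x * Ly + Ly - 1))
     ∨ (x < Lx - 1 ∧ ∃ s, x * Ly ≤ s ∧ s ≤ x * Ly + Ly - 1 ∧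
          p = (s, 2 * (x * Ly) + 2 * Ly - 1 - s)))

-- sorted2 with two Int keys is sorted with the lexicographic key
theorem sorted2_eq_sorted_lex {α : Type} (xs : List α) (k1 k2 : α → Int) :
    PySem.List.sorted2 xs k1 k2 = PySem.List.sorted xs (fun a => toLex (k1 a, k2 a)) := by
  unfold PySem.List.sorted2 PySem.List.sorted
  simp only []
  congr 1
  funext acc x
  congr 1
  funext a b
  have h : (toLex (k1 a, k2 a) < toLex (k1 b, k2 b)) ↔ (k1 a < k1 b ∨ k1 a = k1 b ∧ k2 a < k2 b) := Prod.Lex.lt_iff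
  simp only [Bool.false_eq_true, if_false]
  rw [Bool.eq_iff_iff]
  simp only [Bool.or_eq_true, Bool.and_eq_true, Bool.not_eq_true', decide_eq_true_iff,
    decide_eq_false_iff_not, h]
  constructor <;> (intro h'; omega)

theorem foldl_update_eq {α : Type} [BEq α] (l : List Int) (f : Int → List α) (s : PySem.Set α) :
    l.foldl (fun s x => PySem.Set.update s (f x)) s = PySem.Set.update s (l.flatMap f) := by
  induction l generalizing s with
  | nil => simp [PySem.Set.update_nil]
  | cons x t ih => simp [List.flatMap_cons, PySem.Set.update_append, ih]

theorem cbCoords_eq (Ly Lx : Int) :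
    cbCoords Ly Lx
      = (PySem.List.pyRange 0 Lx 1).flatMap (fun x => (cbRng Ly x).map (fun y => (y, x))) := by
  unfold cbCoords
  refine Eq.trans (PySem.List.foldl_congr_mem _ _
    (fun coords x => coords ++ (cbRng Ly x).map (fun y => (y, x)))
    _ (fun acc x _ => PySem.List.foldl_append_singleton_eq_map ..)) ?_
  · simpa using PySem.List.foldl_append_eq_flatMap (fun x => (cbRng Ly x).map (fun y => (y, x))) (PySem.List.pyRange 0 Lx 1) []

theorem cbRng_length (Ly x : Int) : (cbRng Ly x).length = Ly.toNat := by
  unfold cbRng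
  split
  · simp [PySem.List.length_pyRange_one]
  · simp [PySem.List.length_pyRange_neg_one]

theorem cbRng_nodup (Ly x : Int) : (cbRng Ly x).Nodup := by
  unfold cbRng
  split
  · exact PySem.List.nodup_pyRange_one ..
  · rw [PySem.List.pyRange_neg_one_eq_reverse]
    exact List.nodup_reverse.mpr (PySem.List.nodup_pyRange_one ..)

theorem cbRng_getElem? (Ly x : Int) (j : Nat) (hj : (j : Int) < Ly) :
    (cbRng Ly x)[j]? = some (if PySem.Int.mod x 2 == 0 then (j : Int) else Ly - 1 - (j : Int)) := by
  unfold cbRng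
  split
  · rw [PySem.List.pyRange_one]
    rw [List.getElem?_map, List.getElem?_range (by omega)]
    simp
  · rw [PySem.List.pyRange_neg_one]
    rw [List.getElem?_map, List.getElem?_range (by omega)]
    simp

theorem cbCoords_nodup (Ly Lx : Int) : (cbCoords Ly Lx).Nodup := by
  rw [cbCoords_eq]
  rw [List.nodup_flatMap]
  constructor
  · intro x _
    exact (cbRng_nodup Ly x).map (fun a b h => by simpa using congrArg Prod.fst h)
  · have := PySem.List.nodup_pyRange_one 0 Lx
    refine List.Pairwise.imp_of_mem ?_ ((List.nodup_iff_pairwise_ne ..).mp this)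
    intro a b _ _ hne p hpa hpb
    simp only [List.mem_map] at hpa hpb
    obtain ⟨_, _, rfl⟩ := hpa
    obtain ⟨_, _, h2⟩ := hpb
    exact hne (congrArg Prod.snd h2).symm

theorem cbIdx_toNat (Ly y x : Int) (hy : 0 ≤ y) (hy2 : y < Ly) (hx : 0 ≤ x) :
    (cbIdx Ly y x).toNat
      = x.toNat * Ly.toNat + (if PySem.Int.mod x 2 == 0 then y else Ly - 1 - y).toNat := by
  unfold cbIdx
  have hc : x * Ly = ((x.toNat * Ly.toNat : Nat) : Int) := by
    push_cast
    rw [Int.toNat_of_nonneg hx, Int.toNat_of_nonneg (by omega : (0:Int) ≤ Ly)]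
  split <;> omega

theorem cbCoords_getElem? (Ly Lx y x : Int) (hy : 0 ≤ y) (hy2 : y < Ly)
    (hx : 0 ≤ x) (hx2 : x < Lx) :
    (cbCoords Ly Lx)[(cbIdx Ly y x).toNat]? = some (y, x) := by
  set j : Int := if PySem.Int.mod x 2 == 0 then y else Ly - 1 - y with hjdef
  have hj0 : 0 ≤ j := by rw [hjdef]; split <;> omega
  have hjLy : j < Ly := by rw [hjdef]; split <;> omega
  rw [cbCoords_eq]
  rw [PySem.List.pyRange_one_append 0 x Lx hx (le_of_lt hx2),
      PySem.List.pyRange_one_cons hx2]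
  rw [List.flatMap_append, List.flatMap_cons]
  have hlenA : ((PySem.List.pyRange 0 x 1).flatMap
      (fun x => (cbRng Ly x).map (fun y => (y, x)))).length = x.toNat * Ly.toNat := by
    rw [List.length_flatMap]
    have : ∀ z ∈ PySem.List.pyRange 0 x 1,
        ((cbRng Ly z).map (fun y => (y, z))).length = Ly.toNat := by
      intro z _; rw [List.length_map, cbRng_length]
    rw [List.map_congr_left this, List.map_const', List.sum_replicate, smul_eq_mul,
        PySem.List.length_pyRange_one]
    have hx0 : (x - 0).toNat = x.toNat := by omega
    rw [hx0]
  rw [cbIdx_toNat Ly y x hy hy2 hx, ← hjdef]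
  rw [List.getElem?_append_right (by omega), hlenA]
  have hjlt : j.toNat < ((cbRng Ly x).map (fun y => (y, x))).length := by
    rw [List.length_map, cbRng_length]; omega
  rw [List.getElem?_append_left (by omega : x.toNat * Ly.toNat + j.toNat - x.toNat * Ly.toNat < _)]
  have : x.toNat * Ly.toNat + j.toNat - x.toNat * Ly.toNat = j.toNat := by omega
  rw [this, List.getElem?_map, cbRng_getElem? Ly x j.toNat (by omega)]
  simp only [Option.map_some]
  congr 1
  have hjval : ((j.toNat : Int)) = j := Int.toNat_of_nonneg hj0
  rw [hjval]
  by_cases hc : (PySem.Int.mod x 2 == 0) = true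
  · rw [if_pos hc, hjdef, if_pos hc]
  · rw [if_neg hc, hjdef, if_neg hc]
    have h3 : Ly - 1 - (Ly - 1 - y) = y := by omega
    rw [h3]

theorem c2s_getD (Ly Lx y x : Int) (hy : 0 ≤ y) (hy2 : y < Ly)
    (hx : 0 ≤ x) (hx2 : x < Lx) :
    (cbC2s Ly Lx).getD (y, x) 0 = cbIdx Ly y x := by
  have hnd := cbCoords_nodup Ly Lx
  have hitems : (cbC2s Ly Lx).items
      = (PySem.List.enumerate (cbCoords Ly Lx) 0).map (fun a => (a.2, a.1)) := by
    unfold cbC2s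
    have h := PySem.Dict.items_foldl_insert_fresh
      (l := PySem.List.enumerate (cbCoords Ly Lx) 0)
      (k := fun a => a.2) (v := fun a => a.1) (d := PySem.Dict.empty)
      (fun a _ => PySem.Dict.contains_empty _)
      (by rw [PySem.List.map_snd_enumerate]; exact hnd)
    simpa using h
  have hkeys : (cbC2s Ly Lx).keys.Nodup := by
    unfold cbC2s
    exact PySem.Dict.nodup_keys_foldl_insert_key _ _ _ _ PySem.Dict.nodup_keys_empty
  have hlen : (cbIdx Ly y x).toNat < (cbCoords Ly Lx).length := by
    have h := cbCoords_getElem? Ly Lx y x hy hy2 hx hx2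
    exact (List.getElem?_eq_some_iff.mp h).1
  have hmem : ((y, x), cbIdx Ly y x) ∈ (cbC2s Ly Lx).items := by
    rw [hitems]
    refine List.mem_map.mpr ⟨(cbIdx Ly y x, (y, x)), ?_, rfl⟩
    rw [PySem.List.mem_enumerate_iff]
    refine ⟨(cbIdx Ly y x).toNat, hlen, ?_⟩
    have hval : (cbCoords Ly Lx)[(cbIdx Ly y x).toNat] = (y, x) :=
      (List.getElem?_eq_some_iff.mp (cbCoords_getElem? Ly Lx y x hy hy2 hx hx2)).2
    rw [hval]
    have h0 : 0 ≤ cbIdx Ly y x := by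
      unfold cbIdx
      have := mul_nonneg hx (by omega : (0:Int) ≤ Ly)
      split <;> omega
    congr 1
    omega
  exact PySem.Dict.getD_of_mem_items _ hmem hkeys 0
    
theorem A_eq (Ly Lx : Int) :
    cylinder_bonds Ly Lx
      = (Ly * Lx, PySem.List.sorted2 (PySem.Set.ofList (allA Ly Lx)) (·.1) (·.2)) := by
  unfold cylinder_bonds allA
  refine Prod.ext rfl ?_
  simp only
  congr 1
  refine Eq.trans (PySem.List.foldl_congr_mem _ _
    (fun bonds x => PySem.Set.update bonds
      ((PySem.List.pyRange 0 Ly 1).flatMap (fun y => aItems Ly Lx x y))) _ ?_) ?_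
  · intro acc x hx
    rw [PySem.List.mem_pyRange_one] at hx
    refine Eq.trans (PySem.List.foldl_congr_mem _ _
      (fun acc y => PySem.Set.update acc (aItems Ly Lx x y)) _ ?_) ?_
    · intro acc2 y hy
      rw [PySem.List.mem_pyRange_one] at hy
      have hLy : 0 < Ly := by omega
      have hmod1 : 0 ≤ PySem.Int.mod (y + 1) Ly := PySem.Int.mod_nonneg _ hLy
      have hmod2 : PySem.Int.mod (y + 1) Ly < Ly := PySem.Int.mod_lt _ hLy
      simp only
      rw [c2s_getD Ly Lx y x hy.1 hy.2 hx.1 hx.2,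
          c2s_getD Ly Lx _ x hmod1 hmod2 hx.1 hx.2]
      unfold aItems
      by_cases hx3 : x < Lx - 1
      · rw [if_pos hx3, if_pos hx3,
            c2s_getD Ly Lx y (x + 1) hy.1 hy.2 (by omega) (by omega)]
        by_cases hne : cbIdx Ly y x ≠ cbIdx Ly (PySem.Int.mod (y + 1) Ly) x
        · rw [if_pos hne, if_pos hne]
          simp [PySem.Set.update_cons, PySem.Set.update_nil]
        · rw [if_neg hne, if_neg hne]
          simp [PySem.Set.update_cons, PySem.Set.update_nil]
      · rw [if_neg hx3, if_neg hx3]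
        by_cases hne : cbIdx Ly y x ≠ cbIdx Ly (PySem.Int.mod (y + 1) Ly) x
        · rw [if_pos hne, if_pos hne]
          simp [PySem.Set.update_cons, PySem.Set.update_nil]
        · rw [if_neg hne, if_neg hne]
          simp [PySem.Set.update_cons, PySem.Set.update_nil]
    · exact foldl_update_eq _ _ acc
  · rw [foldl_update_eq]
    exact PySem.Set.update_nil_left _

theorem B_eq (Ly Lx : Int) : cylinder_bonds_alt Ly Lx = (Ly * Lx, allB Ly Lx) := by
  unfold cylinder_bonds_alt allB
  refine Prod.ext rfl ?_
  simp only
  refine Eq.trans (PySem.List.foldl_congr_mem _ _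
    (fun bonds x => bonds ++ (PySem.List.pyRange 0 Ly 1).flatMap (fun j => bSite Ly Lx x j))
    _ ?_) ?_
  · intro acc x _
    refine Eq.trans (PySem.List.foldl_congr_mem _ _
      (fun acc j => acc ++ bSite Ly Lx x j) _ ?_) ?_
    · intro acc2 j _
      unfold bSite
      by_cases h1 : j < Ly - 1 <;> by_cases h2 : j = 0 ∧ Ly > 2 <;>
        by_cases h3 : x < Lx - 1 <;> simp [h1, h2, h3] <;> split <;> simp
    · exact PySem.List.foldl_append_eq_flatMap _ _ acc
  · simpa using PySem.List.foldl_append_eq_flatMap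
      (fun x => (PySem.List.pyRange 0 Ly 1).flatMap (fun j => bSite Ly Lx x j))
      (PySem.List.pyRange 0 Lx 1) []

theorem cbIdx_bounds (Ly y x : Int) (hy : 0 ≤ y) (hy2 : y < Ly) :
    x * Ly ≤ cbIdx Ly y x ∧ cbIdx Ly y x ≤ x * Ly + Ly - 1 := by
  unfold cbIdx; split <;> omega

theorem cbIdx_sum (Ly y x : Int) (hy : 0 ≤ y) (hy2 : y < Ly) :
    cbIdx Ly y x + cbIdx Ly y (x + 1) = 2 * (x * Ly) + 2 * Ly - 1 := by
  unfold cbIdx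
  have hm : PySem.Int.mod x 2 = x % 2 := PySem.Int.mod_eq_emod_of_pos (a := x) (by omega)
  have hm' : PySem.Int.mod (x + 1) 2 = (x + 1) % 2 := PySem.Int.mod_eq_emod_of_pos (a := x + 1) (by omega)
  have hr : (x + 1) * Ly = x * Ly + Ly := by ring
  rw [hm, hm']
  by_cases h : x % 2 = 0
  · have h1 : (x + 1) % 2 = 1 := by omega
    simp only [h, h1]
    norm_num
    omega
  · have h0 : x % 2 = 1 := by omega
    have h1 : (x + 1) % 2 = 0 := by omega
    simp only [h0, h1]
    norm_num
    omega

theorem cbIdx_surj (Ly x s : Int) (hLy : 0 < Ly) (h1 : x * Ly ≤ s) (h2 : s ≤ x * Ly + Ly - 1) :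
    ∃ y, 0 ≤ y ∧ y < Ly ∧ cbIdx Ly y x = s := by
  unfold cbIdx
  by_cases h : (PySem.Int.mod x 2 == 0) = true
  · exact ⟨s - x * Ly, by omega, by omega, by simp only [h, if_pos]; omega⟩
  · refine ⟨x * Ly + Ly - 1 - s, by omega, by omega, ?_⟩
    simp only [h, if_neg, Bool.not_eq_true]
    omega

theorem mod_succ_self (Ly y : Int) (h0 : 0 ≤ y) (h1 : y < Ly) :
    PySem.Int.mod (y + 1) Ly = if y + 1 = Ly then 0 else y + 1 := by
  rw [PySem.Int.mod_eq_emod_of_pos (a := y + 1) (b := Ly) (by omega)]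
  split
  · rename_i h; rw [h]; exact Int.emod_self
  · exact Int.emod_eq_of_lt (by omega) (by omega)

theorem cbIdx_next (Ly y x : Int) :
    cbIdx Ly (y + 1) x = cbIdx Ly y x + 1 ∨ cbIdx Ly (y + 1) x = cbIdx Ly y x - 1 := by
  unfold cbIdx
  split
  · left; omega
  · right; omega

theorem cbIdx_wrap (Ly x : Int) :
    (cbIdx Ly (Ly - 1) x = x * Ly + Ly - 1 ∧ cbIdx Ly 0 x = x * Ly)
    ∨ (cbIdx Ly (Ly - 1) x = x * Ly ∧ cbIdx Ly 0 x = x * Ly + Ly - 1) := by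
  unfold cbIdx
  split
  · left; constructor <;> omega
  · right; constructor <;> omega

theorem mem_allA_iff (Ly Lx : Int) (p : Int × Int) :
    p ∈ allA Ly Lx ↔ BondCond Ly Lx p := by
  unfold allA aItems BondCond
  simp only [List.mem_flatMap, PySem.List.mem_pyRange_one, List.mem_append,
    List.mem_ite_nil_right, List.mem_singleton]
  constructor
  · rintro ⟨x, hx, y, hy, ⟨hc, hp⟩ | ⟨hc, hp⟩⟩
    · -- horizontal bond
      have hb1 := cbIdx_bounds Ly y x hy.1 hy.2
      have hb2 := cbIdx_bounds Ly y (x + 1) hy.1 hy.2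
      have hr : (x + 1) * Ly = x * Ly + Ly := by ring
      have hsum := cbIdx_sum Ly y x hy.1 hy.2
      refine ⟨x, hx.1, hx.2, Or.inr (Or.inr ⟨hc,
        min (cbIdx Ly y x) (cbIdx Ly y (x + 1)), by omega, by omega, ?_⟩)⟩
      rw [hp]
      simp only [Prod.mk.injEq, true_and, and_true]
      omega
    · -- vertical bond
      rw [mod_succ_self Ly y hy.1 hy.2] at hc hp
      by_cases hw : y + 1 = Ly
      · rw [if_pos hw] at hc hp
        have h0 : y = Ly - 1 := by omega
        subst h0
        have hcw := cbIdx_wrap Ly x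
        refine ⟨x, hx.1, hx.2, Or.inr (Or.inl ⟨by omega, ?_⟩)⟩
        rw [hp]
        simp only [Prod.mk.injEq, true_and, and_true]
        omega
      · rw [if_neg hw] at hc hp
        have hb1 := cbIdx_bounds Ly y x hy.1 hy.2
        have hb2 := cbIdx_bounds Ly (y + 1) x (by omega) (by omega)
        have e := cbIdx_next Ly y x
        refine ⟨x, hx.1, hx.2, Or.inl
          ⟨min (cbIdx Ly y x) (cbIdx Ly (y + 1) x), by omega, by omega, ?_⟩⟩
        rw [hp]
        simp only [Prod.mk.injEq, true_and, and_true]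
        omega
  · rintro ⟨x, hx0, hx1, ⟨s, hs1, hs2, rfl⟩ | ⟨h2, rfl⟩ | ⟨hc, s, hs1, hs2, rfl⟩⟩
    · -- a rung (s, s+1): realised by a vertical bond
      by_cases h : (PySem.Int.mod x 2 == 0) = true
      · have e1 : cbIdx Ly (s - x * Ly) x = s := by unfold cbIdx; simp only [h, if_pos]; omega
        have e2 : cbIdx Ly (s - x * Ly + 1) x = s + 1 := by
          unfold cbIdx; simp only [h, if_pos]; omega
        have hm : PySem.Int.mod (s - x * Ly + 1) Ly = s - x * Ly + 1 := by
          rw [mod_succ_self Ly (s - x * Ly) (by omega) (by omega), if_neg (by omega)]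
        refine ⟨x, ⟨hx0, hx1⟩, s - x * Ly, by omega, Or.inr ⟨?_, ?_⟩⟩ <;> rw [hm]
        · omega
        · simp only [Prod.mk.injEq, true_and, and_true]; omega
      · have e1 : cbIdx Ly (x * Ly + Ly - 2 - s) x = s + 1 := by
          unfold cbIdx; simp only [h, if_neg, Bool.not_eq_true]; omega
        have e2 : cbIdx Ly (x * Ly + Ly - 2 - s + 1) x = s := by
          unfold cbIdx; simp only [h, if_neg, Bool.not_eq_true]; omega
        have hm : PySem.Int.mod (x * Ly + Ly - 2 - s + 1) Ly = x * Ly + Ly - 2 - s + 1 := by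
          rw [mod_succ_self Ly (x * Ly + Ly - 2 - s) (by omega) (by omega), if_neg (by omega)]
        refine ⟨x, ⟨hx0, hx1⟩, x * Ly + Ly - 2 - s, by omega, Or.inr ⟨?_, ?_⟩⟩ <;> rw [hm]
        · omega
        · simp only [Prod.mk.injEq, true_and, and_true]; omega
    · -- the wrap bond of column x
      have hm : PySem.Int.mod (Ly - 1 + 1) Ly = 0 := by
        rw [mod_succ_self Ly (Ly - 1) (by omega) (by omega), if_pos (by omega)]
      have hcw := cbIdx_wrap Ly x
      refine ⟨x, ⟨hx0, hx1⟩, Ly - 1, by omega, Or.inr ⟨?_, ?_⟩⟩ <;> rw [hm]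
      · omega
      · simp only [Prod.mk.injEq, true_and, and_true]; omega
    · -- a horizontal bond
      obtain ⟨y, hy0, hy1, e⟩ := cbIdx_surj Ly x s (by omega) hs1 hs2
      have hb2 := cbIdx_bounds Ly y (x + 1) hy0 hy1
      have hr : (x + 1) * Ly = x * Ly + Ly := by ring
      have hsum := cbIdx_sum Ly y x hy0 hy1
      refine ⟨x, ⟨hx0, hx1⟩, y, ⟨hy0, hy1⟩, Or.inl ⟨hc, ?_⟩⟩
      simp only [Prod.mk.injEq, true_and, and_true]
      omega

theorem mem_allB_iff (Ly Lx : Int) (p : Int × Int) :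
    p ∈ allB Ly Lx ↔ BondCond Ly Lx p := by
  unfold allB bSite BondCond
  simp only [List.mem_flatMap, PySem.List.mem_pyRange_one, List.mem_append,
    List.mem_ite_nil_right, List.mem_singleton]
  constructor
  · rintro ⟨x, hx, j, hj, (⟨hc, hp⟩ | ⟨hc, hp⟩) | ⟨hc, hp⟩⟩
    · exact ⟨x, hx.1, hx.2, Or.inl ⟨x * Ly + j, by omega, by omega, hp⟩⟩
    · refine ⟨x, hx.1, hx.2, Or.inr (Or.inl ⟨by omega, ?_⟩)⟩
      rw [hp]
      simp only [Prod.mk.injEq, true_and, and_true]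
      omega
    · exact ⟨x, hx.1, hx.2, Or.inr (Or.inr ⟨hc, x * Ly + j, by omega, by omega, hp⟩)⟩
  · rintro ⟨x, hx0, hx1, ⟨s, hs1, hs2, rfl⟩ | ⟨h2, rfl⟩ | ⟨hc, s, hs1, hs2, rfl⟩⟩
    · refine ⟨x, ⟨hx0, hx1⟩, s - x * Ly, by omega, Or.inl (Or.inl ⟨by omega, ?_⟩)⟩
      simp only [Prod.mk.injEq, true_and, and_true]
      omega
    · by_cases h3 : Ly > 2
      · refine ⟨x, ⟨hx0, hx1⟩, 0, by omega, Or.inl (Or.inr ⟨⟨rfl, h3⟩, ?_⟩)⟩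
        simp only [Prod.mk.injEq, true_and, and_true]
        omega
      · refine ⟨x, ⟨hx0, hx1⟩, 0, by omega, Or.inl (Or.inl ⟨by omega, ?_⟩)⟩
        simp only [Prod.mk.injEq, true_and, and_true]
        omega
    · refine ⟨x, ⟨hx0, hx1⟩, s - x * Ly, by omega, Or.inr ⟨hc, ?_⟩⟩
      simp only [Prod.mk.injEq, true_and, and_true]
      omega

theorem bSite_fst (Ly Lx x j : Int) : ∀ p ∈ bSite Ly Lx x j, p.1 = x * Ly + j := by
  intro p hp
  unfold bSite at hp
  simp only [List.mem_append, List.mem_ite_nil_right, List.mem_singleton] at hp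
  rcases hp with (⟨_, rfl⟩ | ⟨_, rfl⟩) | ⟨_, rfl⟩ <;> rfl

theorem pairwise_bSite (Ly Lx x j : Int) (hj : 0 ≤ j ∧ j < Ly) :
    (bSite Ly Lx x j).Pairwise (fun p q => p.1 < q.1 ∨ (p.1 = q.1 ∧ p.2 < q.2)) := by
  unfold bSite
  by_cases h1 : j < Ly - 1 <;> by_cases h2 : j = 0 ∧ Ly > 2 <;>
    by_cases h3 : x < Lx - 1 <;>
    simp [h1, h2, h3, List.pairwise_cons] <;>
    (try rw [if_pos (show (1:Int) < Ly by omega)]) <;>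
    (try simp [List.pairwise_cons]) <;>
    omega

theorem pairwise_allB (Ly Lx : Int) :
    (allB Ly Lx).Pairwise (fun p q => p.1 < q.1 ∨ (p.1 = q.1 ∧ p.2 < q.2)) := by
  unfold allB
  rw [List.pairwise_flatMap]
  constructor
  · intro x _
    rw [List.pairwise_flatMap]
    constructor
    · intro j hj
      rw [PySem.List.mem_pyRange_one] at hj
      exact pairwise_bSite Ly Lx x j hj
    · refine (PySem.List.pairwise_lt_pyRange_one 0 Ly).imp_of_mem ?_
      intro j1 j2 _ _ hlt p hp q hq
      rw [bSite_fst Ly Lx x j1 p hp, bSite_fst Ly Lx x j2 q hq]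
      left; omega
  · refine (PySem.List.pairwise_lt_pyRange_one 0 Lx).imp_of_mem ?_
    intro x1 x2 _ _ hlt p hp q hq
    rw [List.mem_flatMap] at hp hq
    obtain ⟨j1, hj1, hp⟩ := hp
    obtain ⟨j2, hj2, hq⟩ := hq
    rw [PySem.List.mem_pyRange_one] at hj1 hj2
    rw [bSite_fst Ly Lx x1 j1 p hp, bSite_fst Ly Lx x2 j2 q hq]
    left
    have hmul : (x1 + 1) * Ly ≤ x2 * Ly :=
      mul_le_mul_of_nonneg_right (by omega) (by omega)
    have hr : (x1 + 1) * Ly = x1 * Ly + Ly := by ring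
    omega

theorem nodup_allB (Ly Lx : Int) : (allB Ly Lx).Nodup := by
  refine (pairwise_allB Ly Lx).imp ?_
  intro p q h heq
  subst heq
  omega

theorem cylinder_bonds_spec : Claim_equal_cylinder_bonds := by
  intro Ly Lx _
  unfold Spec_cylinder_bonds
  rw [A_eq, B_eq]
  refine Prod.ext rfl ?_
  simp only
  rw [sorted2_eq_sorted_lex]
  refine PySem.List.sorted_eq_of_perm_of_pairwise_lt _ _ _ ?_ ?_
  · rw [List.perm_ext_iff_of_nodup (nodup_allB Ly Lx) (PySem.Set.nodup_ofList _)]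
    intro p
    rw [mem_allB_iff, PySem.Set.mem_ofList, mem_allA_iff]
  · refine (pairwise_allB Ly Lx).imp ?_
    intro p q h
    rw [Prod.Lex.lt_iff]
    simpa using h
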